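-- pv_equiv track=rewrite | github.com/impproductions/advent-of-code-2023 | day12/solution.py | insert_zeros
-- ===== SOURCE A (Python) =====
-- from typing import List
--
-- def insert_zeros(array: List[int], num_zeros: int) -> List[List[int]]:
--     def backtrack(index: int, path: List[int], zeros_remaining: int):
--         # Base case: when all elements from the original array have been processed
--         if index == len(array):
--             results.append(path + [0] * zeros_remaining)  # Append remaining zeros at the end
--             return
--
--         # Insert zeros before the current element (including before the first element)
--         min_zeros = 1 if index > 0 else 0  # Ensure at least one zero between non-zero elements
--         for zeros_to_insert in range(min_zeros, zeros_remaining - (len(array) - index - 1) + 1):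
--             new_path = path + [0] * zeros_to_insert + [array[index]]
--             backtrack(index + 1, new_path, zeros_remaining - zeros_to_insert)
--
--     results = []
--     backtrack(0, [], num_zeros)
--     return results
-- ===== SOURCE B (Python) =====
-- from typing import List
--
-- def _compositions(total: int, k: int) -> List[List[int]]:
--     # all k-tuples of non-negative ints summing to total, lexicographically ascending
--     if k == 1:
--         return [[total]]
--     return [[e] + rest for e in range(total + 1) for rest in _compositions(total - e, k - 1)]
--
-- def _assemble(xs: List[int], extras: List[int], first: bool) -> List[int]:
--     # interleave: extras[i] free zeros (plus one mandatory separator zero after the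
--     # first element) before each element, trailing zeros from the last extra
--     if not xs:
--         return [0] * extras[0]
--     e = extras[0] if first else extras[0] + 1
--     return [0] * e + [xs[0]] + _assemble(xs[1:], extras[1:], False)
--
-- def insert_zeros(array: List[int], num_zeros: int) -> List[List[int]]:
--     n = len(array)
--     if n == 0:
--         return [[0] * num_zeros]
--     free = num_zeros - (n - 1)
--     if free < 0:
--         return []
--     return [_assemble(array, extras, True) for extras in _compositions(free, n + 1)]
-- ===== Notes on version B (the rewrite author's own statement) =====
-- stated objective: alternative
-- what changed: Replaced A's path-accumulating backtracking (prefix lists threaded through a recursive DFS that appends into a shared results list) by a two-pass stars-and-bars scheme: first enumerate all gap-size tuples (compositions of the free zeros into n+1 non-negative parts, lexicographically ascending), then assemble each row independently by structural recursion over the array.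
import Mathlib
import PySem

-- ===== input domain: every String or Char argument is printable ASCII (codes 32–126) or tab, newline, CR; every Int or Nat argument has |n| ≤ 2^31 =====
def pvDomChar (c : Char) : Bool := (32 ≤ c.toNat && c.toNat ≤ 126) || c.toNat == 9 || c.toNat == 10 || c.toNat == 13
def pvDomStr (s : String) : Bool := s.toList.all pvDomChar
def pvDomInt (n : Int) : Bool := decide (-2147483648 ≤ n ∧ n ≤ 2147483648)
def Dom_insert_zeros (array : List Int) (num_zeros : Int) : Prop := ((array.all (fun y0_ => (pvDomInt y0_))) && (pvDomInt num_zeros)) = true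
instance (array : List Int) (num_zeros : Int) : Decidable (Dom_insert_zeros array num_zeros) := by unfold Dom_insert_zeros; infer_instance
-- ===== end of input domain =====

-- B replaces A's path-accumulating backtracking by a two-pass stars-and-bars scheme
-- (enumerate gap compositions, then assemble each row); objective: alternative, same cost.

-- ===== PORT A =====
-- A's inner 'backtrack(index, path, zeros_remaining)': ported structurally on the
-- remaining suffix of the array ('rest' = array[index:], 'first' = (index == 0));
-- the shared 'results' list becomes the returned list, appended in the same DFS order.
def insert_zeros_backtrack (rest : List Int) (path : List Int) (zeros_remaining : Int)
    (first : Bool) : List (List Int) :=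
  match rest with
  | [] => [path ++ List.replicate zeros_remaining.toNat 0]
  | x :: tail =>
    let min_zeros : Int := if first then 0 else 1
    (PySem.List.pyRange min_zeros (zeros_remaining - (tail.length : Int) + 1) 1).foldl
      (fun acc z =>
        acc ++ insert_zeros_backtrack tail (path ++ List.replicate z.toNat 0 ++ [x])
                (zeros_remaining - z) false) []

def insert_zeros (array : List Int) (num_zeros : Int) : List (List Int) :=
  insert_zeros_backtrack array [] num_zeros true

-- ===== PORT B =====
-- _compositions(total, k); k = 0 is unreachable in Source B (always called with k ≥ 1)
def pvComps (total : Int) : Nat → List (List Int)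
  | 0 => []
  | 1 => [[total]]
  | (k + 2) =>
    (PySem.List.pyRange 0 (total + 1) 1).flatMap
      (fun e => (pvComps (total - e) (k + 1)).map (fun rest => e :: rest))

-- _assemble(xs, extras, first); the empty-extras cases are unreachable in Source B
-- (extras always one longer than xs, where Python would raise IndexError)
def pvAssemble : List Int → List Int → Bool → List Int
  | [], e :: _, _ => List.replicate e.toNat 0
  | [], [], _ => []
  | x :: xs, e :: es, first =>
    List.replicate (if first then e else e + 1).toNat 0 ++ [x] ++ pvAssemble xs es false
  | _ :: _, [], _ => []

def insert_zeros_alt (array : List Int) (num_zeros : Int) : List (List Int) :=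
  let n := array.length
  if n = 0 then [List.replicate num_zeros.toNat 0]
  else
    let free : Int := num_zeros - ((n : Int) - 1)
    if free < 0 then []
    else (pvComps free (n + 1)).map (fun extras => pvAssemble array extras true)

-- ===== PRECONDITION & SPEC =====
def Spec_insert_zeros (array : List Int) (num_zeros : Int) (out : List (List Int)) : Prop := out = insert_zeros_alt array num_zeros
instance (array : List Int) (num_zeros : Int) (out : List (List Int)) : Decidable (Spec_insert_zeros array num_zeros out) := by unfold Spec_insert_zeros; infer_instance

-- ===== CLAIM (what is proved, stated in full; the proofs are below) =====
def Claim_equal_insert_zeros : Prop := ∀ (array : List Int) (num_zeros : Int), Dom_insert_zeros array num_zeros → Spec_insert_zeros array num_zeros (insert_zeros array num_zeros)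

-- ===== LEMMAS AND PROOFS =====

-- minimum number of zeros backtrack must still place over 'rest' (1 per separator)
def pvMins (rest : List Int) (first : Bool) : Int :=
  match rest with
  | [] => 0
  | _ :: t => (if first then 0 else 1) + (t.length : Int)

theorem pvMins_false (t : List Int) : pvMins t false = (t.length : Int) := by
  cases t <;> simp [pvMins] <;> omega

theorem pyRange_shift (a b : Int) :
    PySem.List.pyRange a b 1 = (PySem.List.pyRange 0 (b - a) 1).map (fun e => e + a) := by
  rw [PySem.List.pyRange_one, PySem.List.pyRange_one, List.map_map]
  simp only [sub_zero]
  exact List.map_congr_left (fun k _ => by simp [Function.comp]; ring)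

theorem bt_eq (rest : List Int) : ∀ (path : List Int) (rem : Int) (first : Bool),
    (rest = [] → 0 ≤ rem) →
    insert_zeros_backtrack rest path rem first =
      if rem < pvMins rest first then []
      else (pvComps (rem - pvMins rest first) (rest.length + 1)).map
            (fun ex => path ++ pvAssemble rest ex first) := by
  induction rest with
  | nil =>
    intro path rem first h
    rw [if_neg (by simpa [pvMins] using not_lt.mpr (h rfl))]
    simp [insert_zeros_backtrack, pvComps, pvMins, pvAssemble]
  | cons x tail ih =>
    intro path rem first _
    have hL : insert_zeros_backtrack (x :: tail) path rem first =
        (PySem.List.pyRange (if first then 0 else 1) (rem - (tail.length : Int) + 1) 1).foldl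
          (fun acc z => acc ++ insert_zeros_backtrack tail
            (path ++ List.replicate z.toNat 0 ++ [x]) (rem - z) false) [] := rfl
    have hpm : pvMins (x :: tail) first
        = (if first then (0 : Int) else 1) + (tail.length : Int) := by
      cases first <;> simp [pvMins]
    by_cases hlt : rem < pvMins (x :: tail) first
    · rw [if_pos hlt, hL,
        PySem.List.pyRange_one_eq_nil (by
          rw [hpm] at hlt
          generalize (if first = true then (0 : Int) else 1) = m at hlt ⊢
          omega)]
      simp
    · rw [if_neg hlt, hL]
      rw [hpm] at hlt
      have hfun : ∀ (acc : List (List Int)) (z : Int),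
          z ∈ PySem.List.pyRange (if first then (0 : Int) else 1)
                (rem - (tail.length : Int) + 1) 1 →
          (acc ++ insert_zeros_backtrack tail (path ++ List.replicate z.toNat 0 ++ [x])
              (rem - z) false)
          = acc ++ ((pvComps (rem - z - (tail.length : Int)) (tail.length + 1)).map
              (fun ex => (path ++ List.replicate z.toNat 0 ++ [x]) ++ pvAssemble tail ex false)) := by
        intro acc z hz
        obtain ⟨hz1, hz2⟩ := PySem.List.mem_pyRange_one.mp hz
        rw [ih _ (rem - z) false (fun _ => by omega), pvMins_false, if_neg (by omega)]
      rw [PySem.List.foldl_congr_mem _ _ _ _ hfun, PySem.List.foldl_append_eq_flatMap]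
      have hC : pvComps (rem - pvMins (x :: tail) first) ((x :: tail).length + 1) =
          (PySem.List.pyRange 0 (rem - pvMins (x :: tail) first + 1) 1).flatMap
            (fun e => (pvComps (rem - pvMins (x :: tail) first - e) (tail.length + 1)).map
              (fun rest => e :: rest)) := rfl
      rw [hC, List.map_flatMap,
        pyRange_shift (if first then (0 : Int) else 1) (rem - (tail.length : Int) + 1),
        List.flatMap_map]
      have he : rem - (tail.length : Int) + 1 - (if first then (0 : Int) else 1)
          = rem - pvMins (x :: tail) first + 1 := by rw [hpm]; ring
      rw [he]
      simp only [Function.comp_def, List.nil_append]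
      refine congrArg (fun g => List.flatMap g (PySem.List.pyRange 0 (rem - pvMins (x :: tail) first + 1) 1)) (funext fun e => ?_)
      have harg : rem - (e + (if first then (0 : Int) else 1)) - (tail.length : Int)
          = rem - pvMins (x :: tail) first - e := by rw [hpm]; ring
      rw [harg, List.map_map]
      refine congrArg (fun f => List.map f (pvComps (rem - pvMins (x :: tail) first - e) (tail.length + 1))) (funext fun ex => ?_)
      cases first <;> simp [pvAssemble]

-- ===== VERDICT (by name: the statement is the Claim_ definition above) =====
theorem insert_zeros_spec : Claim_equal_insert_zeros := by
  intro array num_zeros _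
  show insert_zeros array num_zeros = insert_zeros_alt array num_zeros
  cases array with
  | nil => simp [insert_zeros, insert_zeros_backtrack, insert_zeros_alt]
  | cons x tail =>
    rw [insert_zeros, bt_eq _ _ _ _ (by simp)]
    have hpm : pvMins (x :: tail) true = (tail.length : Int) := by simp [pvMins]
    have hB : insert_zeros_alt (x :: tail) num_zeros =
        (if num_zeros - (((x :: tail).length : Int) - 1) < 0 then []
         else (pvComps (num_zeros - (((x :: tail).length : Int) - 1)) ((x :: tail).length + 1)).map
                (fun extras => pvAssemble (x :: tail) extras true)) := by
      rw [insert_zeros_alt]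
      simp
    rw [hB, hpm]
    have hc : num_zeros - (((x :: tail).length : Int) - 1) = num_zeros - (tail.length : Int) := by
      simp only [List.length_cons]; push_cast; ring
    rw [hc]
    by_cases hlt : num_zeros - (tail.length : Int) < 0
    · rw [if_pos (by omega), if_pos hlt]
    · rw [if_neg (by omega), if_neg hlt]
      simp
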